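-- pv_equiv track=rewrite | github.com/annachupryna/chupryna_hillel_homework | Homework_7/task_5.py | custom_all
-- ===== SOURCE A (Python) =====
-- def custom_all(custom_list):
--     define_list = []
--     for el in range(len(custom_list)):
--         if custom_list[el]:
--             define_list.append(True)
--         else:
--             define_list.append(False)
--     if False in define_list:
--         return False
--     else:
--         return True
-- ===== SOURCE B (Python) =====
-- def custom_all(custom_list):
--     for el in custom_list:
--         if not el:
--             return False
--     return True
-- ===== Notes on version B (the rewrite author's own statement) =====
-- stated objective: simpler
-- what changed: B replaces A's build-a-boolean-copy-via-index-loop plus 'False in' membership scan with a single early-exit pass over the elements, maintaining no auxiliary list.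
import Mathlib
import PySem

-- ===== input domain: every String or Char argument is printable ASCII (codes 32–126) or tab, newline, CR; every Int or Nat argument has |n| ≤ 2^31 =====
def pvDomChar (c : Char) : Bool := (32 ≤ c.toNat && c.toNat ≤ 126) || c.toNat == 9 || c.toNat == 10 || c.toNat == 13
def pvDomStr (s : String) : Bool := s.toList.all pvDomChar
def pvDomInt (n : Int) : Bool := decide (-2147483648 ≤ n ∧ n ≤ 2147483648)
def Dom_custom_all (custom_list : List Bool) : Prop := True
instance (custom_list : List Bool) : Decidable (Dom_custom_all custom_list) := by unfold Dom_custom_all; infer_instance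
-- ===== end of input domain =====

-- ===== PORT A =====
-- A: builds define_list by indexing over range(len), then checks membership of False.
def custom_all (custom_list : List Bool) : Bool :=
  let define_list :=
    (PySem.List.pyRange 0 custom_list.length 1).foldl (fun acc el =>
      match PySem.List.pyGet? custom_list el with
      | some b => if b then acc ++ [true] else acc ++ [false]
      | none => acc) []   -- pyGet? is always some here (el in range)
  if false ∈ define_list then false else true

-- ===== PORT B =====
-- B: single early-exit pass, no auxiliary list; simpler decomposition.
def custom_all_alt (custom_list : List Bool) : Bool :=
  match custom_list with
  | [] => true
  | el :: rest => if !el then false else custom_all_alt rest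

-- ===== PRECONDITION & SPEC =====
def Spec_custom_all (custom_list : List Bool) (out : Bool) : Prop := out = custom_all_alt custom_list
instance (custom_list : List Bool) (out : Bool) : Decidable (Spec_custom_all custom_list out) := by unfold Spec_custom_all; infer_instance

-- ===== CLAIM (what is proved, stated in full; the proofs are below) =====
def Claim_equal_custom_all : Prop := ∀ (custom_list : List Bool), Dom_custom_all custom_list → Spec_custom_all custom_list (custom_all custom_list)

-- ===== LEMMAS AND PROOFS =====

lemma define_list_eq (l : List Bool) :
    (PySem.List.pyRange 0 l.length 1).foldl (fun acc el =>
      match PySem.List.pyGet? l el with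
      | some b => if b then acc ++ [true] else acc ++ [false]
      | none => acc) [] = l := by
  induction l using List.reverseRecOn with
  | nil => simp
  | append_singleton xs x ih =>
    have hlen : ((xs ++ [x]).length : Int) = (xs.length : Int) + 1 := by
      simp
    rw [hlen, PySem.List.pyRange_one_succ_right (by positivity),
        List.foldl_append]
    have hcongr :
        (PySem.List.pyRange 0 xs.length 1).foldl (fun acc el =>
          match PySem.List.pyGet? (xs ++ [x]) el with
          | some b => if b then acc ++ [true] else acc ++ [false]
          | none => acc) [] =
        (PySem.List.pyRange 0 xs.length 1).foldl (fun acc el =>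
          match PySem.List.pyGet? xs el with
          | some b => if b then acc ++ [true] else acc ++ [false]
          | none => acc) [] := by
      apply PySem.List.foldl_congr_mem
      intro acc el hel
      have h := (PySem.List.mem_pyRange_one).1 hel
      have h0 : 0 ≤ el := h.1
      have h1 : el < (xs.length : Int) := h.2
      have hget : PySem.List.pyGet? (xs ++ [x]) el = PySem.List.pyGet? xs el := by
        rw [PySem.List.pyGet?_of_nonneg (xs ++ [x]) h0, PySem.List.pyGet?_of_nonneg xs h0,
            List.getElem?_append_left (by omega)]
      rw [hget]
    rw [hcongr, ih]
    simp only [List.foldl_cons, List.foldl_nil, PySem.List.pyGet?_append_length]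
    cases x <;> simp

lemma custom_all_eq (l : List Bool) :
    (if false ∈ l then false else true) = custom_all_alt l := by
  induction l with
  | nil => simp [custom_all_alt]
  | cons a t ih =>
    cases a <;> simp [custom_all_alt, ← ih]

-- ===== VERDICT (by name: the statement is the Claim_ definition above) =====
theorem custom_all_spec : Claim_equal_custom_all := by
  intro l _
  unfold Spec_custom_all
  rw [custom_all]
  simp only [define_list_eq]
  simpa using custom_all_eq l
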